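-- pv_equiv track=rewrite | github.com/oxpig/ANARCI | Example_scripts_and_sequences/ImmunoPDB.py | get_alignment_dict
-- ===== SOURCE A (Python) =====
-- def get_alignment_dict(ali1,ali2):
--     """
--     Get a dictionary which tells you the index in sequence 2 that should align with the index in sequence 1 (key)
--
--     ali1:  ----bcde-f---        seq1: bcdef
--     ali2:  ---abcd--f---        seq2: abcdf
--
--     alignment_dict={
--         0:1,
--         1:2,
--         2:3,
--         4:4
--         }
--
--     If the index is aligned with a gap do not include in the dictionary.
--     e.g  1 in alignment_dict  --> True
--     e.g  3 in alignment_dict  --> False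
--     """
--     assert len(ali1)==len(ali2), "aligned sequences must be same lengths (including gaps)"
--     alignment_dict={}
--     p1=-1
--     p2=-1
--     for ap in range( len(ali1) ):
--         if ali1[ap] != "-" and ali2[ap] != "-":
--             assert ali1[ap] == ali2[ap], 'The sequence in the structure did not match that in the provided sequence (seqres entry)'
--             p1+=1
--             p2+=1
--             alignment_dict[p1] = p2
--         elif ali1[ap] != "-":
--             p1+=1
--         elif ali2[ap] != "-":
--             p2+=1
--     return alignment_dict
-- ===== SOURCE B (Python) =====
-- def get_alignment_dict(ali1, ali2):
--     assert len(ali1)==len(ali2), "aligned sequences must be same lengths (including gaps)"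
--     # precompute, per string, the running sequence index at every alignment column
--     idx1 = []
--     t = -1
--     for c in ali1:
--         if c != "-":
--             t += 1
--         idx1.append(t)
--     idx2 = []
--     t = -1
--     for c in ali2:
--         if c != "-":
--             t += 1
--         idx2.append(t)
--     # counter-free pairing pass: direct table lookup at double-letter columns
--     alignment_dict = {}
--     for (c1, c2), (i1, i2) in zip(zip(ali1, ali2), zip(idx1, idx2)):
--         if c1 != "-" and c2 != "-":
--             assert c1 == c2, 'The sequence in the structure did not match that in the provided sequence (seqres entry)'
--             alignment_dict[i1] = i2
--     return alignment_dict
-- ===== Notes on version B (the rewrite author's own statement) =====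
-- stated objective: alternative
-- what changed: Replaces A's single pass with two mutable running counters by precomputed prefix index tables (one per string) followed by a counter-free pairing pass that reads the indices from the tables.
import Mathlib
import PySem

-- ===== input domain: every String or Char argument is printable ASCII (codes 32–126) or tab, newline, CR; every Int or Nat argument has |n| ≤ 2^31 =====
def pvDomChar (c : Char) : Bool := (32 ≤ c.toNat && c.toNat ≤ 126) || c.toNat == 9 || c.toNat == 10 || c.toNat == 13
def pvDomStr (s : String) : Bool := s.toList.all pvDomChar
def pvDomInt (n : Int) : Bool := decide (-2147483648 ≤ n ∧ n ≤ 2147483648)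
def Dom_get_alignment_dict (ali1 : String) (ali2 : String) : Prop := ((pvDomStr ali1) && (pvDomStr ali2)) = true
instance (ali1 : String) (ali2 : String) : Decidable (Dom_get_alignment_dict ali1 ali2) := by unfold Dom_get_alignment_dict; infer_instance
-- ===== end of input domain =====

-- B replaces A's running counters by precomputed prefix index tables plus a counter-free pairing pass; equal cost, different decomposition.

-- ===== PORT A =====
-- A's loop 'for ap in range(len(ali1))' over equal-length strings (Pre_), carrying (dict, p1, p2)
def pvAGo : List (Char × Char) → PySem.Dict Int Int → Int → Int → PySem.Dict Int Int
  | [], d, _, _ => d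
  | (c1, c2) :: rest, d, p1, p2 =>
    if c1 ≠ '-' ∧ c2 ≠ '-' then pvAGo rest (d.insert (p1 + 1) (p2 + 1)) (p1 + 1) (p2 + 1)
    else if c1 ≠ '-' then pvAGo rest d (p1 + 1) p2
    else if c2 ≠ '-' then pvAGo rest d p1 (p2 + 1)
    else pvAGo rest d p1 p2

def get_alignment_dict (ali1 : String) (ali2 : String) : List (Int × Int) :=
  (pvAGo (ali1.toList.zip ali2.toList) PySem.Dict.empty (-1) (-1)).items

-- ===== PORT B =====
-- the prefix index table: running non-gap count minus one, at every column
def pvIdxGo : List Char → Int → List Int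
  | [], _ => []
  | c :: rest, t =>
    let t' := if c ≠ '-' then t + 1 else t
    t' :: pvIdxGo rest t'

-- the counter-free pairing pass over zip(zip(ali1, ali2), zip(idx1, idx2))
def pvBGo : List ((Char × Char) × (Int × Int)) → PySem.Dict Int Int → PySem.Dict Int Int
  | [], d => d
  | ((c1, c2), (i1, i2)) :: rest, d =>
    if c1 ≠ '-' ∧ c2 ≠ '-' then pvBGo rest (d.insert i1 i2) else pvBGo rest d

def get_alignment_dict_alt (ali1 : String) (ali2 : String) : List (Int × Int) :=
  let idx1 := pvIdxGo ali1.toList (-1)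
  let idx2 := pvIdxGo ali2.toList (-1)
  (pvBGo ((ali1.toList.zip ali2.toList).zip (idx1.zip idx2)) PySem.Dict.empty).items

-- ===== PRECONDITION & SPEC =====
-- Pre_ excludes exactly the inputs on which A raises AssertionError: unequal lengths, or a
-- mismatching pair of non-gap characters at some aligned column.
def Pre_get_alignment_dict (ali1 : String) (ali2 : String) : Prop :=
  PySem.Str.len ali1 = PySem.Str.len ali2 ∧
  ∀ p ∈ ali1.toList.zip ali2.toList, p.1 ≠ '-' → p.2 ≠ '-' → p.1 = p.2
instance (ali1 : String) (ali2 : String) : Decidable (Pre_get_alignment_dict ali1 ali2) := by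
  unfold Pre_get_alignment_dict; infer_instance

def pvWitness_get_alignment_dict : String × String := ("--bcde-f--", "-abcd--f--")

def Spec_get_alignment_dict (ali1 : String) (ali2 : String) (out : List (Int × Int)) : Prop := out = get_alignment_dict_alt ali1 ali2
instance (ali1 : String) (ali2 : String) (out : List (Int × Int)) : Decidable (Spec_get_alignment_dict ali1 ali2 out) := by unfold Spec_get_alignment_dict; infer_instance

-- ===== CLAIM (what is proved, stated in full; the proofs are below) =====
def Claim_equal_get_alignment_dict : Prop := ∀ (ali1 : String) (ali2 : String), Dom_get_alignment_dict ali1 ali2 → Pre_get_alignment_dict ali1 ali2 → Spec_get_alignment_dict ali1 ali2 (get_alignment_dict ali1 ali2)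

-- ===== LEMMAS AND PROOFS =====

-- A's loop at counters (p1, p2) equals B's pairing pass when the tables are built from those counters
theorem pvAGo_eq_pvBGo (ps : List (Char × Char)) (d : PySem.Dict Int Int) (p1 p2 : Int) :
    pvAGo ps d p1 p2 =
      pvBGo (ps.zip ((pvIdxGo (ps.map Prod.fst) p1).zip (pvIdxGo (ps.map Prod.snd) p2))) d := by
  induction ps generalizing d p1 p2 with
  | nil => rfl
  | cons hd tl ih =>
    obtain ⟨c1, c2⟩ := hd
    by_cases h1 : c1 = '-' <;> by_cases h2 : c2 = '-' <;>
      simp [pvAGo, pvBGo, pvIdxGo, h1, h2, ih]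

theorem get_alignment_dict_spec : Claim_equal_get_alignment_dict := by
  intro ali1 ali2 _hdom hpre
  unfold Spec_get_alignment_dict get_alignment_dict get_alignment_dict_alt
  have hlen : ali1.toList.length = ali2.toList.length := by
    have := hpre.1; simpa [PySem.Str.len_eq] using this
  have h1 : (ali1.toList.zip ali2.toList).map Prod.fst = ali1.toList :=
    List.map_fst_zip (by omega)
  have h2 : (ali1.toList.zip ali2.toList).map Prod.snd = ali2.toList :=
    List.map_snd_zip (by omega)
  rw [pvAGo_eq_pvBGo, h1, h2]
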